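-- pv_equiv track=rewrite | github.com/monkrobot/test_project | JuniorLab/Which_are_in.py | strfunc
-- ===== SOURCE A (Python) =====
-- def strfunc(a1, a2):
--     a = sorted(a1)
--     answer = []
--     for word in a:
--         for seq in a2:
--             if word in seq:
--                 answer.append(word)
--                 break
--             else:
--                 continue
--     return answer
-- ===== SOURCE B (Python) =====
-- def strfunc(a1, a2):
--     matched = set()
--     remaining = set(a1)
--     for seq in a2:
--         if not remaining:
--             break
--         hit = {w for w in remaining if w in seq}
--         matched |= hit
--         remaining -= hit
--     return sorted(w for w in a1 if w in matched)
-- ===== Notes on version B (the rewrite author's own statement) =====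
-- stated objective: alternative
-- what changed: Inverted the loop nest: B makes one pass over a2, keeping a set of still-unmatched words, marks the words of each element in one set operation and stops early once every word is matched, then returns sorted(filter) over the original a1; A sorts first and scans a2 per word with a break.
import Mathlib
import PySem

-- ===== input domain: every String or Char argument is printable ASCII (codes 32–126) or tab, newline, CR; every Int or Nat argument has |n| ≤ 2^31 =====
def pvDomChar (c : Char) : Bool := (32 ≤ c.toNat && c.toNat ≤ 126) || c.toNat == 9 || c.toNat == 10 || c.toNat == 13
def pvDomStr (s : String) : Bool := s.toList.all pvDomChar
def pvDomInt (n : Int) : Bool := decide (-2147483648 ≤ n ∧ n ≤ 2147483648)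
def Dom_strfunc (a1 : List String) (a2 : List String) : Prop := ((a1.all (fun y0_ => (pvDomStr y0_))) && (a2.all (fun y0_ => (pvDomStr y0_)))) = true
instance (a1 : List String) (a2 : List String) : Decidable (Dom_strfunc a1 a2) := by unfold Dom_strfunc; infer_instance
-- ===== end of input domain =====

-- B inverts A's loop nest (a2 outer, set of matched words, sorted(filter) at the end); alternative decomposition, same results.

-- ===== PORT A =====
-- inner 'for seq in a2: if word in seq: append; break; else: continue'
def strfuncInner (word : String) (a2 : List String) (answer : List String) : List String :=
  match a2 with
  | [] => answer
  | seq :: rest =>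
      if PySem.Str.isIn word seq then answer ++ [word]
      else strfuncInner word rest answer

def strfunc (a1 : List String) (a2 : List String) : List String :=
  let a := PySem.List.sorted a1 (fun x => x) false
  a.foldl (fun answer word => strfuncInner word a2 answer) []

-- ===== PORT B =====
-- 'for seq in a2: if not remaining: break; hit = {w for w in remaining if w in seq}; matched |= hit; remaining -= hit'
def strfuncAltLoop (matched : PySem.Set String) (remaining : PySem.Set String)
    (a2 : List String) : PySem.Set String :=
  match a2 with
  | [] => matched
  | seq :: rest =>
      if remaining = [] then matched
      else
        let hit : PySem.Set String := remaining.filter (fun w => PySem.Str.isIn w seq)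
        strfuncAltLoop (PySem.Set.union matched hit) (PySem.Set.diff remaining hit) rest

def strfunc_alt (a1 : List String) (a2 : List String) : List String :=
  let matched := strfuncAltLoop PySem.Set.empty (PySem.Set.ofList a1) a2
  PySem.List.sorted (a1.filter (fun w => PySem.Set.contains matched w)) (fun x => x) false

-- ===== PRECONDITION & SPEC =====
def Spec_strfunc (a1 : List String) (a2 : List String) (out : List String) : Prop := out = strfunc_alt a1 a2
instance (a1 : List String) (a2 : List String) (out : List String) : Decidable (Spec_strfunc a1 a2 out) := by unfold Spec_strfunc; infer_instance

-- ===== CLAIM (what is proved, stated in full; the proofs are below) =====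
def Claim_equal_strfunc : Prop := ∀ (a1 : List String) (a2 : List String), Dom_strfunc a1 a2 → Spec_strfunc a1 a2 (strfunc a1 a2)

-- ===== LEMMAS AND PROOFS =====

-- the per-word inner loop of A appends the word iff some element of a2 contains it
theorem strfuncInner_eq (word : String) (a2 : List String) (answer : List String) :
    strfuncInner word a2 answer =
      answer ++ (if a2.any (fun seq => PySem.Str.isIn word seq) then [word] else []) := by
  induction a2 with
  | nil => simp [strfuncInner]
  | cons seq rest ih =>
      rw [strfuncInner]
      by_cases h : PySem.Str.isIn word seq = true
      · rw [if_pos h]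
        have hany : (seq :: rest).any (fun s => PySem.Str.isIn word s) = true := by
          rw [List.any_cons, h, Bool.true_or]
        rw [hany, if_pos rfl]
      · have hb : PySem.Str.isIn word seq = false := by
          revert h; cases PySem.Str.isIn word seq <;> simp
        rw [if_neg h, ih]
        have hany : (seq :: rest).any (fun s => PySem.Str.isIn word s)
            = rest.any (fun s => PySem.Str.isIn word s) := by
          rw [List.any_cons, hb, Bool.false_or]
        rw [hany]

-- A's outer loop over any list l is a filter of l
theorem foldl_inner_eq (a2 : List String) (l : List String) (acc : List String) :
    l.foldl (fun answer word => strfuncInner word a2 answer) acc =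
      acc ++ l.filter (fun w => a2.any (fun seq => PySem.Str.isIn w seq)) := by
  induction l generalizing acc with
  | nil => simp
  | cons w rest ih =>
      rw [List.foldl_cons, ih, strfuncInner_eq, List.filter_cons]
      by_cases h : (a2.any fun seq => PySem.Str.isIn w seq) = true
      · rw [if_pos h, if_pos h]; simp
      · rw [if_neg h, if_neg h]; simp

theorem strfunc_eq_filter_sorted (a1 a2 : List String) :
    strfunc a1 a2 =
      (PySem.List.sorted a1 (fun x => x) false).filter
        (fun w => a2.any (fun seq => PySem.Str.isIn w seq)) := by
  show (PySem.List.sorted a1 (fun x => x) false).foldl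
      (fun answer word => strfuncInner word a2 answer) [] = _
  rw [foldl_inner_eq, List.nil_append]

-- membership in B's matched set after the loop (no invariant needed: an empty
-- 'remaining' makes both sides collapse to 'x ∈ matched')
theorem mem_altLoop (matched remaining : PySem.Set String) (a2 : List String) (x : String) :
    x ∈ strfuncAltLoop matched remaining a2 ↔
      x ∈ matched ∨ (x ∈ remaining ∧ ∃ seq ∈ a2, PySem.Str.isIn x seq = true) := by
  induction a2 generalizing matched remaining with
  | nil => simp [strfuncAltLoop]
  | cons seq rest ih =>
      rw [strfuncAltLoop]
      by_cases he : remaining = []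
      · rw [if_pos he]
        subst he
        simp
      · rw [if_neg he, ih, PySem.Set.mem_union, PySem.Set.mem_diff]
        simp only [List.mem_filter, List.mem_cons]
        by_cases hp : PySem.Str.isIn x seq = true
        · constructor
          · rintro ((h | ⟨h1, _⟩) | ⟨⟨h1, _⟩, s, hs1, hs2⟩)
            · exact Or.inl h
            · exact Or.inr ⟨h1, seq, Or.inl rfl, hp⟩
            · exact Or.inr ⟨h1, s, Or.inr hs1, hs2⟩
          · rintro (h | ⟨h1, _, _, _⟩)
            · exact Or.inl (Or.inl h)
            · exact Or.inl (Or.inr ⟨h1, hp⟩)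
        · constructor
          · rintro ((h | ⟨_, h2⟩) | ⟨⟨h1, _⟩, s, hs1, hs2⟩)
            · exact Or.inl h
            · exact absurd h2 hp
            · exact Or.inr ⟨h1, s, Or.inr hs1, hs2⟩
          · rintro (h | ⟨h1, s, hs1 | hs1, hs2⟩)
            · exact Or.inl (Or.inl h)
            · exact absurd (hs1 ▸ hs2) hp
            · exact Or.inr ⟨⟨h1, fun hf => hp hf.2⟩, s, hs1, hs2⟩

theorem strfunc_alt_eq_sorted_filter (a1 a2 : List String) :
    strfunc_alt a1 a2 =
      PySem.List.sorted (a1.filter (fun w => a2.any (fun seq => PySem.Str.isIn w seq)))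
        (fun x => x) false := by
  show PySem.List.sorted
      (a1.filter (fun w => PySem.Set.contains
        (strfuncAltLoop PySem.Set.empty (PySem.Set.ofList a1) a2) w))
      (fun x => x) false = _
  congr 1
  apply List.filter_congr
  intro w hw
  by_cases h : (a2.any fun seq => PySem.Str.isIn w seq) = true
  · rw [h]
    rw [PySem.Set.contains_iff, mem_altLoop]
    simp only [List.any_eq_true] at h
    exact Or.inr ⟨(PySem.Set.mem_ofList a1 w).mpr hw, h⟩
  · have hb : (a2.any fun seq => PySem.Str.isIn w seq) = false := by
      revert h; cases a2.any fun seq => PySem.Str.isIn w seq <;> simp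
    rw [hb]
    by_contra hc
    have hc' : PySem.Set.contains
        (strfuncAltLoop PySem.Set.empty (PySem.Set.ofList a1) a2) w = true := by
      revert hc; cases PySem.Set.contains
        (strfuncAltLoop PySem.Set.empty (PySem.Set.ofList a1) a2) w <;> simp
    rw [PySem.Set.contains_iff, mem_altLoop] at hc'
    rcases hc' with hc' | ⟨_, s, hs1, hs2⟩
    · simp [PySem.Set.empty] at hc'
    · exact h (List.any_eq_true.mpr ⟨s, hs1, hs2⟩)

-- filtering a sorted list = sorting the filtered list (equal strings are interchangeable)
theorem filter_sorted_eq (a1 : List String) (p : String → Bool) :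
    (PySem.List.sorted a1 (fun x => x) false).filter p =
      PySem.List.sorted (a1.filter p) (fun x => x) false := by
  exact (PySem.List.sorted_id_eq_of_perm_of_pairwise (a1.filter p)
    ((PySem.List.sorted a1 (fun x => x) false).filter p)
    ((PySem.List.sorted_perm a1 (fun x => x) false).filter p)
    ((PySem.List.sorted_pairwise a1 (fun x => x)).filter p)).symm

-- ===== VERDICT (by name: the statement is the Claim_ definition above) =====
theorem strfunc_spec : Claim_equal_strfunc := by
  intro a1 a2 _
  unfold Spec_strfunc
  rw [strfunc_eq_filter_sorted, strfunc_alt_eq_sorted_filter, filter_sorted_eq]
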